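-- pv_equiv track=rewrite | github.com/TimHuisman1703/simpleGA_python | Experiment_writer.py | remove_small_test_size
-- ===== SOURCE A (Python) =====
-- from collections import defaultdict
--
-- def create_nested_dict(n):
--     if n <= 1:
--         return {}
--     else:
--         return defaultdict(lambda: create_nested_dict(n - 1))
--
-- def remove_small_test_size(grouped):
--     correct_size = 0
--     sizes = create_nested_dict(2)
--     for set_name, in_dict in grouped.items():
--         for instance, in_dict1 in in_dict.items():
--             count_of_diff_crossovers = 0
--             for local_search, in_dict2 in in_dict1.items():
--                 for _, _ in in_dict2.items():
--                     count_of_diff_crossovers += 1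
--             sizes[set_name][instance] = count_of_diff_crossovers
--             if set_name == "setD" and instance == "n0000040i07.txt":
--                 correct_size = count_of_diff_crossovers
--     left_cos_enough_data = create_nested_dict(2)
--     for set_name, in_dict in grouped.items():
--         for instance, in_dict1 in in_dict.items():
--             if sizes[set_name][instance] == correct_size:
--                 left_cos_enough_data[set_name][instance] = in_dict1
--     return left_cos_enough_data
-- ===== SOURCE B (Python) =====
-- def remove_small_test_size(grouped):
--     ref = grouped.get("setD", {}).get("n0000040i07.txt")
--     correct_size = sum(len(ls) for ls in ref.values()) if ref is not None else 0
--     result = {}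
--     for set_name, in_dict in grouped.items():
--         kept = {instance: d for instance, d in in_dict.items()
--                 if sum(len(ls) for ls in d.values()) == correct_size}
--         if kept:
--             result[set_name] = kept
--     return result
-- ===== Notes on version B (the rewrite author's own statement) =====
-- stated objective: simpler
-- what changed: B drops A's first counting pass and the nested sizes table entirely: it computes correct_size once by a direct lookup of the reference instance grouped.get('setD', {}).get('n0000040i07.txt') (summing the lengths of its value lists) and then keeps instances in a single filtering pass. Pre_ excludes only association lists with duplicate set-name or instance keys, which no Python dict can produce.
import Mathlib
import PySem

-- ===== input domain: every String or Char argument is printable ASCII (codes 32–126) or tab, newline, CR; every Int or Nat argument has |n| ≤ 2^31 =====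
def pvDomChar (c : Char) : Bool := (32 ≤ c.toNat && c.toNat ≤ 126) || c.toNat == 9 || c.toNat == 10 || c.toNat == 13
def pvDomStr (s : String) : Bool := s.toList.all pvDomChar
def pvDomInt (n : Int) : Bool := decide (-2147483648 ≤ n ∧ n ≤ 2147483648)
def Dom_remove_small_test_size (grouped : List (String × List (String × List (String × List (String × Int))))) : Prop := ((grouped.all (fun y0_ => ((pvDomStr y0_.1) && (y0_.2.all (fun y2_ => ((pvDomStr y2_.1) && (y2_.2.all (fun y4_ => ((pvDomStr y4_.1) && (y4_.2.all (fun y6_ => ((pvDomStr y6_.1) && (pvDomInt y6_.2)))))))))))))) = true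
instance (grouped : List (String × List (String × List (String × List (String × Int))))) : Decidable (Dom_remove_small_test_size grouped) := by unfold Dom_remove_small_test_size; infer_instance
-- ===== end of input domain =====

-- B replaces A's first counting pass and the nested `sizes` table by one direct lookup of the
-- reference instance plus a single filtering pass (objective: simpler; return value only).

-- ===== PORT A =====
-- Literal port of A: pass 1 threads (correct_size, sizes) over all (set, instance) pairs, counting
-- the innermost items one by one into the nested `sizes` defaultdict (PySem.Dict; `d[k][k'] = v` is
-- `modify k empty (insert k' v)`); pass 2 reads `sizes[sn][inst]` — both keys were written in pass 1
-- for the very pair being read, so `getD` is exact — and fills a second nested defaultdict.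
def remove_small_test_size (grouped : List (String × List (String × List (String × List (String × Int))))) : List (String × List (String × List (String × List (String × Int)))) :=
  let st := grouped.foldl (fun st p =>
      p.2.foldl (fun st q =>
        let c : Int := q.2.foldl (fun c r => r.2.foldl (fun c _ => c + 1) c) 0
        (if p.1 = "setD" ∧ q.1 = "n0000040i07.txt" then c else st.1,
         st.2.modify p.1 PySem.Dict.empty (fun inner => inner.insert q.1 c))) st)
    ((0 : Int), (PySem.Dict.empty : PySem.Dict String (PySem.Dict String Int)))
  let left := grouped.foldl (fun L p =>
      p.2.foldl (fun L q =>
        if (st.2.getD p.1 PySem.Dict.empty).getD q.1 0 = st.1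
        then L.modify p.1 PySem.Dict.empty (fun inner => inner.insert q.1 q.2)
        else L) L)
    (PySem.Dict.empty : PySem.Dict String (PySem.Dict String (List (String × List (String × Int)))))
  left.items.map (fun r => (r.1, r.2.items))

-- ===== PORT B =====
-- sum(len(ls) for ls in d1.values())
def pvSizeOf (d1 : List (String × List (String × Int))) : Int :=
  (d1.map (fun p => (p.2.length : Int))).sum

-- Port of B: the two `.get`s plus the `is not None` test become the nested match; one filtering
-- pass builds the result (dict insertion of a fresh key appends; keys are distinct under Pre_).
def remove_small_test_size_alt (grouped : List (String × List (String × List (String × List (String × Int))))) : List (String × List (String × List (String × List (String × Int)))) :=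
  let correct_size : Int :=
    match grouped.lookup "setD" with
    | none => 0
    | some ind =>
      match ind.lookup "n0000040i07.txt" with
      | none => 0
      | some ref => pvSizeOf ref
  grouped.foldl (fun res p =>
    let kept := p.2.filter (fun q => pvSizeOf q.2 == correct_size)
    if kept.isEmpty then res else res ++ [(p.1, kept)]) []

-- ===== PRECONDITION & SPEC =====
-- Pre_ excludes only association lists with duplicate set-name keys or duplicate instance keys
-- inside a set: a Python dict cannot contain duplicate keys, so no call of the Python A can ever
-- receive such a list; the association-list encoding alone admits them, and there a last-write-wins
-- table and a first-match lookup need not agree.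
def Pre_remove_small_test_size (grouped : List (String × List (String × List (String × List (String × Int))))) : Prop :=
  (grouped.map Prod.fst).Nodup ∧ ∀ p ∈ grouped, (p.2.map Prod.fst).Nodup
instance (grouped : List (String × List (String × List (String × List (String × Int))))) : Decidable (Pre_remove_small_test_size grouped) := by unfold Pre_remove_small_test_size; infer_instance

def pvWitness_remove_small_test_size : (List (String × List (String × List (String × List (String × Int))))) :=
  [("setD", [("n0000040i07.txt", [("ls0", [("co0", 1)])]), ("i1", [])]),
   ("setA", [("i1", [("ls0", [("co0", 2)])])])]

def Spec_remove_small_test_size (grouped : List (String × List (String × List (String × List (String × Int))))) (out : List (String × List (String × List (String × List (String × Int))))) : Prop := out = remove_small_test_size_alt grouped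
instance (grouped : List (String × List (String × List (String × List (String × Int))))) (out : List (String × List (String × List (String × List (String × Int))))) : Decidable (Spec_remove_small_test_size grouped out) := by
  unfold Spec_remove_small_test_size
  letI : DecidableEq (List (String × Int)) := inferInstance
  letI : DecidableEq (List (String × List (String × Int))) := inferInstance
  letI : DecidableEq (List (String × List (String × List (String × Int)))) := inferInstance
  letI : DecidableEq (List (String × List (String × List (String × List (String × Int))))) := inferInstance
  infer_instance

-- ===== CLAIM (what is proved, stated in full; the proofs are below) =====
def Claim_equal_remove_small_test_size : Prop := ∀ (grouped : List (String × List (String × List (String × List (String × Int))))), Dom_remove_small_test_size grouped → Pre_remove_small_test_size grouped → Spec_remove_small_test_size grouped (remove_small_test_size grouped)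

-- ===== LEMMAS AND PROOFS =====

-- the (set_name, (instance, in_dict1)) pairs that A's nested loops traverse, flattened
def pvR (g : List (String × List (String × List (String × List (String × Int))))) :
    List (String × (String × List (String × List (String × Int)))) :=
  g.flatMap (fun p => p.2.map (fun q => (p.1, q)))

-- the items view of a nested dict, as A's return statement produces it
def pvItemize (d : PySem.Dict String (PySem.Dict String (List (String × List (String × Int))))) :
    List (String × List (String × List (String × List (String × Int)))) :=
  d.items.map (fun r => (r.1, r.2.items))

lemma pvFlatten {α β σ : Type} (F : σ → α × β → σ) :
    ∀ (l : List (α × List β)) (st : σ),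
      l.foldl (fun st p => p.2.foldl (fun st q => F st (p.1, q)) st) st
        = (l.flatMap (fun p => p.2.map (fun q => (p.1, q)))).foldl F st := by
  intro l
  induction l with
  | nil => intro st; simp
  | cons p t ih => intro st; simp [List.foldl_append, List.foldl_map, ih]

lemma pvFoldLen {γ : Type} : ∀ (l : List γ) (a : Int),
    l.foldl (fun c _ => c + 1) a = a + l.length := by
  intro l
  induction l with
  | nil => intro a; simp
  | cons x t ih => intro a; simp [ih]; omega

lemma pvCnt_gen : ∀ (d1 : List (String × List (String × Int))) (a : Int),
    d1.foldl (fun c r => r.2.foldl (fun c _ => c + 1) c) a = a + pvSizeOf d1 := by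
  intro d1
  induction d1 with
  | nil => intro a; simp [pvSizeOf]
  | cons r t ih =>
    intro a
    rw [List.foldl_cons, pvFoldLen, ih]
    simp [pvSizeOf]
    ring

lemma pvCnt_eq (d1 : List (String × List (String × Int))) :
    d1.foldl (fun c r => r.2.foldl (fun c _ => c + 1) c) 0 = pvSizeOf d1 := by
  simpa using pvCnt_gen d1 0


-- ---- pass 1: correct_size and the sizes table ----

lemma pvR_fst_mem {g : List (String × List (String × List (String × List (String × Int))))}
    {r : String × (String × List (String × List (String × Int)))} (hr : r ∈ pvR g) :
    r.1 ∈ g.map Prod.fst := by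
  simp only [pvR, List.mem_flatMap, List.mem_map] at hr
  obtain ⟨p, hp, q, _, rfl⟩ := hr
  exact List.mem_map_of_mem hp

lemma pvFlatten2 {σ : Type} (G : σ → String → (String × List (String × List (String × Int))) → σ)
    (g : List (String × List (String × List (String × List (String × Int))))) (st : σ) :
    g.foldl (fun st p => p.2.foldl (fun st q => G st p.1 q) st) st
      = (pvR g).foldl (fun st r => G st r.1 r.2) st :=
  pvFlatten (fun st r => G st r.1 r.2) g st

lemma pvFoldCs_nokey :
    ∀ (l : List (String × (String × List (String × List (String × Int))))) (a : Int),
      (∀ r ∈ l, ¬(r.1 = "setD" ∧ r.2.1 = "n0000040i07.txt")) →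
      l.foldl (fun cs r => if r.1 = "setD" ∧ r.2.1 = "n0000040i07.txt" then pvSizeOf r.2.2 else cs) a = a := by
  intro l
  induction l with
  | nil => intro a _; simp
  | cons r t ih =>
    intro a h
    rw [List.foldl_cons, if_neg (h r (by simp))]
    exact ih a (fun r hr => h r (by simp [hr]))

lemma pvFoldCsInner_nokey :
    ∀ (l : List (String × List (String × List (String × Int)))) (a : Int),
      (∀ q ∈ l, q.1 ≠ "n0000040i07.txt") →
      l.foldl (fun cs q => if q.1 = "n0000040i07.txt" then pvSizeOf q.2 else cs) a = a := by
  intro l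
  induction l with
  | nil => intro a _; simp
  | cons q t ih =>
    intro a h
    rw [List.foldl_cons, if_neg (h q (by simp))]
    exact ih a (fun q hq => h q (by simp [hq]))

lemma pvFoldCs_inner :
    ∀ (ind : List (String × List (String × List (String × Int)))) (a : Int),
      (ind.map Prod.fst).Nodup →
      ind.foldl (fun cs q => if q.1 = "n0000040i07.txt" then pvSizeOf q.2 else cs) a
        = (match ind.lookup "n0000040i07.txt" with
           | none => a
           | some ref => pvSizeOf ref) := by
  intro ind
  induction ind with
  | nil => intro a _; simp
  | cons q t ih =>
    intro a hnd
    obtain ⟨q1, q2⟩ := q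
    simp only [List.map_cons, List.nodup_cons] at hnd
    obtain ⟨hq1, hnt⟩ := hnd
    rw [List.foldl_cons]
    by_cases h1 : q1 = "n0000040i07.txt"
    · subst h1
      rw [if_pos rfl]
      have hno : ∀ q ∈ t, (q : String × List (String × List (String × Int))).1 ≠ "n0000040i07.txt" := by
        intro q hq heq
        exact hq1 (heq ▸ List.mem_map_of_mem hq)
      rw [pvFoldCsInner_nokey t _ hno]
      simp [List.lookup]
    · rw [if_neg h1]
      rw [ih a hnt]
      have hb : ("n0000040i07.txt" == q1) = false := by
        simp only [beq_eq_false_iff_ne, ne_eq]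
        exact fun he => h1 he.symm
      simp [List.lookup, hb]

lemma pvCs :
    ∀ (g : List (String × List (String × List (String × List (String × Int))))) (a : Int),
      (g.map Prod.fst).Nodup →
      (∀ p ∈ g, (p.2.map Prod.fst).Nodup) →
      (pvR g).foldl (fun cs r => if r.1 = "setD" ∧ r.2.1 = "n0000040i07.txt" then pvSizeOf r.2.2 else cs) a
        = (match g.lookup "setD" with
           | none => a
           | some ind =>
             match ind.lookup "n0000040i07.txt" with
             | none => a
             | some ref => pvSizeOf ref) := by
  intro g
  induction g with
  | nil => intro a _ _; simp [pvR]
  | cons p t ih =>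
    intro a hnd hin
    obtain ⟨p1, p2⟩ := p
    simp only [List.map_cons, List.nodup_cons] at hnd
    obtain ⟨hp1, hnt⟩ := hnd
    have hRt : pvR ((p1, p2) :: t) = p2.map (fun q => (p1, q)) ++ pvR t := by simp [pvR]
    rw [hRt, List.foldl_append]
    by_cases hD : p1 = "setD"
    · subst hD
      rw [List.foldl_map]
      have hb : (p2.foldl (fun cs q =>
          if ("setD", q).1 = "setD" ∧ ("setD", q).2.1 = "n0000040i07.txt" then pvSizeOf ("setD", q).2.2 else cs) a)
          = p2.foldl (fun cs q => if q.1 = "n0000040i07.txt" then pvSizeOf q.2 else cs) a := by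
        apply PySem.List.foldl_congr_mem
        intro acc q _
        simp
      rw [hb, pvFoldCs_inner p2 a (hin ("setD", p2) (by simp))]
      have hno : ∀ r ∈ pvR t, ¬(r.1 = "setD" ∧ r.2.1 = "n0000040i07.txt") := by
        intro r hr hc
        exact hp1 (hc.1 ▸ pvR_fst_mem hr)
      rw [pvFoldCs_nokey (pvR t) _ hno]
      simp [List.lookup]
    · have hno2 : ∀ r ∈ p2.map (fun q => (p1, q)), ¬(r.1 = "setD" ∧ r.2.1 = "n0000040i07.txt") := by
        intro r hr hc
        simp only [List.mem_map] at hr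
        obtain ⟨q, _, rfl⟩ := hr
        exact hD hc.1
      rw [pvFoldCs_nokey (p2.map (fun q => (p1, q))) a hno2]
      rw [ih a hnt (fun p hp => hin p (by simp [hp]))]
      have hb2 : ("setD" == p1) = false := by
        simp only [beq_eq_false_iff_ne, ne_eq]
        exact fun he => hD he.symm
      simp [List.lookup, hb2]

lemma pvSz_nokey (sn : String) :
    ∀ (l : List (String × (String × List (String × List (String × Int)))))
      (d : PySem.Dict String (PySem.Dict String Int)),
      (∀ r ∈ l, r.1 ≠ sn) →
      (l.foldl (fun d r => d.modify r.1 PySem.Dict.empty (fun inner => inner.insert r.2.1 (pvSizeOf r.2.2))) d).getD sn PySem.Dict.empty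
        = d.getD sn PySem.Dict.empty := by
  intro l
  induction l with
  | nil => intro d _; simp
  | cons r t ih =>
    intro d h
    rw [List.foldl_cons, ih _ (fun r hr => h r (by simp [hr]))]
    simp only [PySem.Dict.modify]
    rw [PySem.Dict.getD_insert_of_ne _ _ _ (fun he => h r (by simp) he.symm)]

lemma pvSz_block (sn : String) :
    ∀ (ind : List (String × List (String × List (String × Int))))
      (d : PySem.Dict String (PySem.Dict String Int)),
      ((ind.map (fun q => (sn, q))).foldl (fun d r => d.modify r.1 PySem.Dict.empty (fun inner => inner.insert r.2.1 (pvSizeOf r.2.2))) d).getD sn PySem.Dict.empty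
        = ind.foldl (fun inner q => inner.insert q.1 (pvSizeOf q.2)) (d.getD sn PySem.Dict.empty) := by
  intro ind
  induction ind with
  | nil => intro d; simp
  | cons q t ih =>
    intro d
    rw [List.map_cons, List.foldl_cons, ih, PySem.Dict.getD_modify_self]
    simp

lemma pvSzInner_nokey (i : String) :
    ∀ (l : List (String × List (String × List (String × Int)))) (inner : PySem.Dict String Int),
      (∀ q ∈ l, q.1 ≠ i) →
      (l.foldl (fun inner q => inner.insert q.1 (pvSizeOf q.2)) inner).getD i 0 = inner.getD i 0 := by
  intro l
  induction l with
  | nil => intro inner _; simp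
  | cons q t ih =>
    intro inner h
    rw [List.foldl_cons, ih _ (fun r hr => h r (by simp [hr]))]
    rw [PySem.Dict.getD_insert_of_ne _ _ _ (fun he => h q (by simp) he.symm)]

lemma pvSzInner (i : String) (d1 : List (String × List (String × Int))) :
    ∀ (l : List (String × List (String × List (String × Int)))) (inner : PySem.Dict String Int),
      (l.map Prod.fst).Nodup → (i, d1) ∈ l →
      (l.foldl (fun inner q => inner.insert q.1 (pvSizeOf q.2)) inner).getD i 0 = pvSizeOf d1 := by
  intro l
  induction l with
  | nil => intro inner _ h; simp at h
  | cons q t ih =>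
    intro inner hnd hmem
    simp only [List.map_cons, List.nodup_cons] at hnd
    obtain ⟨hq1, hnt⟩ := hnd
    rw [List.foldl_cons]
    rcases List.mem_cons.mp hmem with heq | hmemt
    · subst heq
      simp only [] at hq1
      have hno : ∀ r ∈ t, (r : String × List (String × List (String × Int))).1 ≠ i := by
        intro r hr he
        exact hq1 (by rw [← he]; exact List.mem_map_of_mem hr)
      rw [pvSzInner_nokey i t _ hno]
      exact PySem.Dict.getD_insert_self _ _ _ _
    · exact ih _ hnt hmemt

lemma pvSz :
    ∀ (g : List (String × List (String × List (String × List (String × Int)))))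
      (d : PySem.Dict String (PySem.Dict String Int)),
      (g.map Prod.fst).Nodup →
      ∀ sn ind i d1, (sn, ind) ∈ g → (i, d1) ∈ ind → (ind.map Prod.fst).Nodup →
      (((pvR g).foldl (fun d r => d.modify r.1 PySem.Dict.empty (fun inner => inner.insert r.2.1 (pvSizeOf r.2.2))) d).getD sn PySem.Dict.empty).getD i 0
        = pvSizeOf d1 := by
  intro g
  induction g with
  | nil => intro d _ sn ind i d1 h; simp at h
  | cons p t ih =>
    intro d hnd sn ind i d1 hmem hmem1 hndin
    obtain ⟨p1, p2⟩ := p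
    simp only [List.map_cons, List.nodup_cons] at hnd
    obtain ⟨hp1, hnt⟩ := hnd
    have hRt : pvR ((p1, p2) :: t) = p2.map (fun q => (p1, q)) ++ pvR t := by simp [pvR]
    rw [hRt, List.foldl_append]
    rcases List.mem_cons.mp hmem with heq | hmemt
    · cases heq
      have hno : ∀ r ∈ pvR t, (r : String × (String × List (String × List (String × Int)))).1 ≠ sn := by
        intro r hr he
        exact hp1 (he ▸ pvR_fst_mem hr)
      rw [pvSz_nokey sn (pvR t) _ hno, pvSz_block sn ind d]
      exact pvSzInner i d1 ind _ hndin hmem1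
    · exact ih _ hnt sn ind i d1 hmemt hmem1 hndin

-- ---- pass 2: building the result ----

lemma pvFoldFilter {β σ : Type} (c : β → Bool) (f : σ → β → σ) :
    ∀ (l : List β) (s : σ),
      l.foldl (fun s q => if c q then f s q else s) s = (l.filter c).foldl f s := by
  intro l
  induction l with
  | nil => intro s; simp
  | cons q t ih =>
    intro s
    by_cases h : c q <;> simp [h, ih]

lemma pvBlockGrow (sn : String) :
    ∀ (kt : List (String × List (String × List (String × Int))))
      (L : PySem.Dict String (PySem.Dict String (List (String × List (String × Int)))))
      (inner : PySem.Dict String (List (String × List (String × Int)))),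
      L.contains sn = false →
      pvItemize (kt.foldl (fun L q => L.modify sn PySem.Dict.empty (fun i => i.insert q.1 q.2)) (L.insert sn inner))
        = pvItemize L ++ [(sn, (kt.foldl (fun i q => i.insert q.1 q.2) inner).items)] := by
  intro kt
  induction kt with
  | nil =>
    intro L inner h
    simp [pvItemize, PySem.Dict.items_insert_of_not_contains _ _ h]
  | cons q t ih =>
    intro L inner h
    rw [List.foldl_cons, List.foldl_cons]
    have hstep : (L.insert sn inner).modify sn PySem.Dict.empty (fun i => i.insert q.1 q.2)
        = L.insert sn (inner.insert q.1 q.2) := by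
      simp only [PySem.Dict.modify]
      rw [PySem.Dict.getD_insert_self, PySem.Dict.insert_insert_self]
    rw [hstep]
    exact ih L _ h

lemma pvBlock (sn : String) (c : (String × List (String × List (String × Int))) → Bool) :
    ∀ (ind : List (String × List (String × List (String × Int))))
      (L : PySem.Dict String (PySem.Dict String (List (String × List (String × Int))))),
      L.contains sn = false →
      ((ind.filter c).map Prod.fst).Nodup →
      pvItemize (ind.foldl (fun L q => if c q then L.modify sn PySem.Dict.empty (fun i => i.insert q.1 q.2) else L) L)
        = pvItemize L ++ (if (ind.filter c).isEmpty then [] else [(sn, ind.filter c)]) := by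
  intro ind L h hnd
  rw [pvFoldFilter]
  cases hk : ind.filter c with
  | nil => simp
  | cons q0 kt =>
    rw [List.foldl_cons]
    have hstep : L.modify sn PySem.Dict.empty (fun i => i.insert q0.1 q0.2)
        = L.insert sn (PySem.Dict.empty.insert q0.1 q0.2) := by
      simp only [PySem.Dict.modify]
      rw [PySem.Dict.getD_of_not_contains _ _ h]
    rw [hstep, pvBlockGrow sn kt L _ h]
    have hitems : (kt.foldl (fun i q => i.insert q.1 q.2) (PySem.Dict.empty.insert q0.1 q0.2)) = ((q0 :: kt).foldl (fun i q => i.insert q.1 q.2) PySem.Dict.empty) := by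
      rw [List.foldl_cons]
    rw [hitems]
    rw [PySem.Dict.items_foldl_insert_fresh (q0 :: kt) Prod.fst Prod.snd PySem.Dict.empty
        (fun a _ => PySem.Dict.contains_empty _) (hk ▸ hnd)]
    simp [PySem.Dict.empty]

lemma pvBlock_contains (sn : String) (c : (String × List (String × List (String × Int))) → Bool) :
    ∀ (ind : List (String × List (String × List (String × Int))))
      (L : PySem.Dict String (PySem.Dict String (List (String × List (String × Int)))))
      (x : String), x ≠ sn →
      (ind.foldl (fun L q => if c q then L.modify sn PySem.Dict.empty (fun i => i.insert q.1 q.2) else L) L).contains x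
        = L.contains x := by
  intro ind
  induction ind with
  | nil => intro L x _; simp
  | cons q t ih =>
    intro L x hx
    rw [List.foldl_cons]
    by_cases h : c q
    · rw [if_pos h, ih _ x hx]
      simp only [PySem.Dict.modify]
      rw [PySem.Dict.contains_insert]
      simp [hx]
    · rw [if_neg h, ih _ x hx]

lemma pvBAcc (c : (String × List (String × List (String × Int))) → Bool) :
    ∀ (g : List (String × List (String × List (String × List (String × Int)))))
      (res : List (String × List (String × List (String × List (String × Int))))),
      g.foldl (fun res p => if (p.2.filter c).isEmpty then res else res ++ [(p.1, p.2.filter c)]) res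
        = res ++ g.foldl (fun res p => if (p.2.filter c).isEmpty then res else res ++ [(p.1, p.2.filter c)]) [] := by
  intro g
  induction g with
  | nil => intro res; simp
  | cons p t ih =>
    intro res
    rw [List.foldl_cons, List.foldl_cons, ih, ih (if (p.2.filter c).isEmpty then [] else [] ++ [(p.1, p.2.filter c)])]
    by_cases h : (p.2.filter c).isEmpty <;> simp [h]

lemma pvPass2 (c : (String × List (String × List (String × Int))) → Bool) :
    ∀ (g : List (String × List (String × List (String × List (String × Int)))))
      (L : PySem.Dict String (PySem.Dict String (List (String × List (String × Int))))),
      (g.map Prod.fst).Nodup →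
      (∀ p ∈ g, ((p.2.filter c).map Prod.fst).Nodup) →
      (∀ p ∈ g, L.contains p.1 = false) →
      pvItemize (g.foldl (fun L p => p.2.foldl (fun L q => if c q then L.modify p.1 PySem.Dict.empty (fun i => i.insert q.1 q.2) else L) L) L)
        = pvItemize L ++ g.foldl (fun res p => if (p.2.filter c).isEmpty then res else res ++ [(p.1, p.2.filter c)]) [] := by
  intro g
  induction g with
  | nil => intro L _ _ _; simp
  | cons p t ih =>
    intro L hnd hfin hcon
    obtain ⟨p1, p2⟩ := p
    simp only [List.map_cons, List.nodup_cons] at hnd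
    obtain ⟨hp1, hnt⟩ := hnd
    rw [List.foldl_cons, List.foldl_cons]
    rw [ih _ hnt (fun p hp => hfin p (by simp [hp])) ?hcon2]
    case hcon2 =>
      intro p' hp'
      have hne : p'.1 ≠ p1 := by
        intro he
        exact hp1 (he ▸ List.mem_map_of_mem hp')
      rw [pvBlock_contains p1 c p2 L p'.1 hne]
      exact hcon p' (by simp [hp'])
    rw [pvBlock p1 c p2 L (hcon (p1, p2) (by simp)) (hfin (p1, p2) (by simp))]
    rw [pvBAcc c t (if ((p1, p2).2.filter c).isEmpty then [] else [] ++ [((p1, p2).1, (p1, p2).2.filter c)])]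
    by_cases h : (p2.filter c).isEmpty <;> simp [h]

-- ===== VERDICT =====
theorem remove_small_test_size_spec : Claim_equal_remove_small_test_size := by
  intro grouped _hdom hpre
  obtain ⟨hnd, hin⟩ := hpre
  show remove_small_test_size grouped = remove_small_test_size_alt grouped
  simp only [remove_small_test_size, remove_small_test_size_alt]
  -- flatten pass 1 over the (set, (instance, dict)) pairs and split the (correct_size, sizes) pair
  rw [pvFlatten2 (σ := Int × PySem.Dict String (PySem.Dict String Int)) (fun st sn q =>
        (if sn = "setD" ∧ q.1 = "n0000040i07.txt" then
            q.2.foldl (fun c r => r.2.foldl (fun c _ => c + 1) c) 0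
          else st.1,
         st.2.modify sn PySem.Dict.empty fun inner =>
           inner.insert q.1 (q.2.foldl (fun c r => r.2.foldl (fun c _ => c + 1) c) 0)))
      grouped ((0 : Int), PySem.Dict.empty)]
  have hsplit := PySem.List.foldl_prod_mk
      (f := fun (cs : Int) (r : String × (String × List (String × List (String × Int)))) =>
        if r.1 = "setD" ∧ r.2.1 = "n0000040i07.txt" then
          r.2.2.foldl (fun c r => r.2.foldl (fun c _ => c + 1) c) 0
        else cs)
      (g := fun (d : PySem.Dict String (PySem.Dict String Int))
            (r : String × (String × List (String × List (String × Int)))) =>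
        d.modify r.1 PySem.Dict.empty fun inner =>
          inner.insert r.2.1 (r.2.2.foldl (fun c r => r.2.foldl (fun c _ => c + 1) c) 0))
      (pvR grouped) 0 PySem.Dict.empty
  rw [hsplit]
  dsimp only
  simp only [pvCnt_eq]
  rw [pvCs grouped 0 hnd hin]
  -- pass 2: replace the sizes lookup by the size of the pair at hand, flatten back, and rewrite
  set M := (match List.lookup "setD" grouped with
    | none => (0 : Int)
    | some ind =>
      match List.lookup "n0000040i07.txt" ind with
      | none => 0
      | some ref => pvSizeOf ref) with hM
  set SZ := List.foldl
      (fun (d : PySem.Dict String (PySem.Dict String Int))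
           (r : String × (String × List (String × List (String × Int)))) =>
        d.modify r.1 PySem.Dict.empty fun inner => inner.insert r.2.1 (pvSizeOf r.2.2))
      PySem.Dict.empty (pvR grouped) with hSZ
  rw [pvFlatten2 (σ := PySem.Dict String (PySem.Dict String (List (String × List (String × Int)))))
      (fun L sn q => if (SZ.getD sn PySem.Dict.empty).getD q.1 0 = M
        then L.modify sn PySem.Dict.empty fun inner => inner.insert q.1 q.2 else L)
      grouped PySem.Dict.empty]
  have hcg : ∀ (acc : PySem.Dict String (PySem.Dict String (List (String × List (String × Int))))),
      ∀ r ∈ pvR grouped,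
      (if (SZ.getD r.1 PySem.Dict.empty).getD r.2.1 0 = M
        then acc.modify r.1 PySem.Dict.empty fun inner => inner.insert r.2.1 r.2.2 else acc)
      = (if pvSizeOf r.2.2 == M
        then acc.modify r.1 PySem.Dict.empty fun inner => inner.insert r.2.1 r.2.2 else acc) := by
    intro acc r hr
    simp only [pvR, List.mem_flatMap, List.mem_map] at hr
    obtain ⟨p, hp, q, hq, rfl⟩ := hr
    dsimp only
    rw [hSZ, pvSz grouped PySem.Dict.empty hnd p.1 p.2 q.1 q.2 (by simpa using hp) (by simpa using hq) (hin p hp)]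
    by_cases h : pvSizeOf q.2 = M
    · simp [h]
    · simp [h]
  rw [PySem.List.foldl_congr_mem (pvR grouped) _ _ PySem.Dict.empty hcg]
  rw [← pvFlatten2 (σ := PySem.Dict String (PySem.Dict String (List (String × List (String × Int)))))
      (fun L sn q => if pvSizeOf q.2 == M
        then L.modify sn PySem.Dict.empty fun inner => inner.insert q.1 q.2 else L)
      grouped PySem.Dict.empty]
  have hview : ∀ (d : PySem.Dict String (PySem.Dict String (List (String × List (String × Int))))),
      (List.map (fun r => (r.1, r.2.items)) d.items) = pvItemize d := fun _ => rfl
  rw [hview]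
  have hf : ∀ p ∈ grouped, ((p.2.filter (fun q => pvSizeOf q.2 == M)).map Prod.fst).Nodup := by
    intro p hp
    exact List.Nodup.sublist (List.Sublist.map Prod.fst List.filter_sublist) (hin p hp)
  have hc : ∀ p ∈ grouped,
      (PySem.Dict.empty : PySem.Dict String (PySem.Dict String (List (String × List (String × Int))))).contains p.1 = false :=
    fun p _ => PySem.Dict.contains_empty _
  rw [pvPass2 (fun q => pvSizeOf q.2 == M) grouped PySem.Dict.empty hnd hf hc]
  simp [pvItemize, PySem.Dict.empty]
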